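-- pv_equiv track=rewrite | github.com/Carricossauro/lcc | Treino 4/uniao.py | uniao
-- ===== SOURCE A (Python) =====
-- def complete(sets, ls, un, x):
--     return x == len(ls)
--
-- def valid(sets, ls, un, x):
--     resp = set()
--     for y in ls:
--         resp = resp.union(sets[y])
--     return un == resp
--
-- def extensions(sets, ls, un, x):
--     lista = []
--     for i in range(len(sets)):
--         if i not in ls:
--             lista.append(i)
--     return lista
--
-- def search(sets, ls, un, x):
--     if complete(sets, ls, un, x):
--         return valid(sets, ls, un, x)
--
--     for k in extensions(sets, ls, un, x):
--         ls.append(k)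
--         if search(sets, ls, un, x):
--             return True
--         ls.pop()
--
--     return False
--
-- def uniao(sets):
--     N = len(sets)
--     un = set()
--     for x in sets:
--         un = un.union(x)
--
--     for x in range(N):
--         ls = []
--         if search(sets, ls, un, x):
--             return x
--
--     return N
-- ===== SOURCE B (Python) =====
-- def combos(xs, k):
--     # all k-element combinations (as index lists, in xs-order) of xs
--     if k == 0:
--         return [[]]
--     if not xs:
--         return []
--     rest = xs[1:]
--     return [[xs[0]] + c for c in combos(rest, k - 1)] + combos(rest, k)
--
-- def uniao(sets):
--     N = len(sets)
--     un = set()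
--     for s in sets:
--         un = un.union(s)
--     for k in range(N + 1):
--         for c in combos(list(range(N)), k):
--             u = set()
--             for i in c:
--                 u = u.union(sets[i])
--             if u == un:
--                 return k
--     return N
-- ===== Notes on version B (the rewrite author's own statement) =====
-- stated objective: faster
-- what changed: Replaces A's depth-first search over all partial permutations of set indices (retried for every target size x) by a direct enumeration of index combinations of increasing size, returning the first size whose union covers the total union.
import Mathlib
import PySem

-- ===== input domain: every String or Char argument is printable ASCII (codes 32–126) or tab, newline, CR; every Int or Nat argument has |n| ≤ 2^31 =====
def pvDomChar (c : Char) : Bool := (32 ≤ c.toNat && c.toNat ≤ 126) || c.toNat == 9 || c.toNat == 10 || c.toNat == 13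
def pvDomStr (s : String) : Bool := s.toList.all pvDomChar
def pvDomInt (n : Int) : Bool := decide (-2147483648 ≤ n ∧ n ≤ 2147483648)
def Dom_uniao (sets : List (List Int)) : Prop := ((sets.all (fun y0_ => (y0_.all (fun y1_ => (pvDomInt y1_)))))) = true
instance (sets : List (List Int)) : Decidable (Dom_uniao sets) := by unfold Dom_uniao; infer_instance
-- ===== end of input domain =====

-- B replaces A's depth-first search over partial permutations of set indices (restarted for
-- every target size x) by a direct enumeration of index combinations of increasing size:
-- measurably faster (asymptotically fewer candidate lists).

-- ===== PORT A =====
-- sets[y] is ported as pyGetD with default []: every index A ever looks up comes from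
-- range(len(sets)), so the default is never taken.
def validA (sets : List (List Int)) (ls : List Int) (un : PySem.Set Int) : Bool :=
  PySem.Set.equal un
    (ls.foldl (fun resp y => PySem.Set.union resp (PySem.List.pyGetD sets y [])) PySem.Set.empty)

def extensionsA (sets : List (List Int)) (ls : List Int) : List Int :=
  (PySem.List.pyRange 0 (PySem.List.len sets) 1).foldl
    (fun lista i => if ls.contains i then lista else lista ++ [i]) []

-- A's recursion terminates because ls only ever receives fresh indices below len(sets);
-- the fuel sets.length + 1 - ls.length bounds the recursion depth and is never exhausted
-- on the calls uniao makes (proved inside the equivalence proof).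
def searchA (fuel : Nat) (sets : List (List Int)) (ls : List Int) (un : PySem.Set Int)
    (x : Int) : Bool :=
  match fuel with
  | 0 => false
  | fuel + 1 =>
    if x = PySem.List.len ls then validA sets ls un
    else (extensionsA sets ls).any (fun k => searchA fuel sets (ls ++ [k]) un x)

def uniao (sets : List (List Int)) : Int :=
  let N := PySem.List.len sets
  let un := sets.foldl (fun un x => PySem.Set.union un x) PySem.Set.empty
  match (PySem.List.pyRange 0 N 1).find? (fun x => searchA (sets.length + 1) sets [] un x) with
  | some x => x
  | none => N

-- ===== PORT B =====
def combosB (xs : List Int) (k : Int) : List (List Int) :=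
  if k = 0 then [[]]
  else
    match xs with
    | [] => []
    | x :: rest => (combosB rest (k - 1)).map (fun c => x :: c) ++ combosB rest k
termination_by xs.length

def unionC (sets : List (List Int)) (c : List Int) : PySem.Set Int :=
  c.foldl (fun u i => PySem.Set.union u (PySem.List.pyGetD sets i [])) PySem.Set.empty

def uniao_alt (sets : List (List Int)) : Int :=
  let N := PySem.List.len sets
  let un := sets.foldl (fun un s => PySem.Set.union un s) PySem.Set.empty
  match (PySem.List.pyRange 0 (N + 1) 1).find?
      (fun k => (combosB (PySem.List.pyRange 0 N 1) k).any
        (fun c => PySem.Set.equal (unionC sets c) un)) with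
  | some k => k
  | none => N

-- ===== PRECONDITION & SPEC =====
def Spec_uniao (sets : List (List Int)) (out : Int) : Prop := out = uniao_alt sets
instance (sets : List (List Int)) (out : Int) : Decidable (Spec_uniao sets out) := by
  unfold Spec_uniao; infer_instance

-- ===== CLAIM (what is proved, stated in full; the proofs are below) =====
def Claim_equal_uniao : Prop := ∀ (sets : List (List Int)), Dom_uniao sets → Spec_uniao sets (uniao sets)

-- ===== LEMMAS AND PROOFS =====

theorem mem_foldl_union {α : Type} (f : α → List Int) :
    ∀ (l : List α) (s : PySem.Set Int) (y : Int),
      (y ∈ l.foldl (fun u a => PySem.Set.union u (f a)) s) ↔ y ∈ s ∨ ∃ a ∈ l, y ∈ f a := by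
  intro l
  induction l with
  | nil => intro s y; simp
  | cons a l ih =>
    intro s y
    simp [List.foldl_cons, ih, PySem.Set.mem_union]
    tauto

theorem foldl_keep (p : Int → Bool) :
    ∀ (l : List Int) (acc : List Int),
      l.foldl (fun a i => if p i then a else a ++ [i]) acc = acc ++ l.filter (fun i => !p i) := by
  intro l
  induction l with
  | nil => intro acc; simp
  | cons a l ih =>
    intro acc
    by_cases h : p a = true <;> simp [List.foldl_cons, h, ih]

theorem mem_extensionsA (sets : List (List Int)) (ls : List Int) (k : Int) :
    k ∈ extensionsA sets ls ↔ (0 ≤ k ∧ k < (sets.length : Int)) ∧ k ∉ ls := by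
  unfold extensionsA
  rw [foldl_keep (fun i => ls.contains i)]
  simp [PySem.List.mem_pyRange_one]

-- covers: the member-level meaning of both programs' "union of the chosen sets equals un"
def coversP (sets : List (List Int)) (un : PySem.Set Int) (c : List Int) : Prop :=
  ∀ y, y ∈ un ↔ ∃ i ∈ c, y ∈ PySem.List.pyGetD sets i []

theorem validA_iff (sets : List (List Int)) (ls : List Int) (un : PySem.Set Int) :
    validA sets ls un = true ↔ coversP sets un ls := by
  unfold validA coversP
  rw [PySem.Set.equal_iff]
  refine forall_congr' fun y => iff_congr Iff.rfl ?_
  rw [mem_foldl_union]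
  simp [PySem.Set.empty]

theorem checkB_iff (sets : List (List Int)) (c : List Int) (un : PySem.Set Int) :
    PySem.Set.equal (unionC sets c) un = true ↔ coversP sets un c := by
  unfold unionC coversP
  rw [PySem.Set.equal_iff]
  constructor
  · intro h y
    rw [← h y, mem_foldl_union]
    simp [PySem.Set.empty]
  · intro h y
    rw [mem_foldl_union]
    simp only [PySem.Set.empty, List.not_mem_nil, false_or]
    exact (h y).symm

theorem length_le_of_nodup_range (ls : List Int) (N : Nat) (hnd : ls.Nodup)
    (hmem : ∀ i ∈ ls, 0 ≤ i ∧ i < (N : Int)) : ls.length ≤ N := by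
  have hsub : ls ⊆ PySem.List.pyRange 0 (N : Int) 1 := by
    intro i hi
    rw [PySem.List.mem_pyRange_one]
    exact ⟨(hmem i hi).1, (hmem i hi).2⟩
  have := (List.subperm_of_subset hnd hsub).length_le
  simpa [PySem.List.length_pyRange_one] using this

theorem searchA_iff (sets : List (List Int)) (un : PySem.Set Int) (x : Int) :
    ∀ (fuel : Nat) (ls : List Int), ls.Nodup → (∀ i ∈ ls, 0 ≤ i ∧ i < (sets.length : Int)) →
      sets.length < ls.length + fuel →
      (searchA fuel sets ls un x = true ↔
        ∃ ext : List Int, ext.Nodup ∧ (∀ i ∈ ext, (0 ≤ i ∧ i < (sets.length : Int)) ∧ i ∉ ls) ∧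
          ((ls.length : Int) + (ext.length : Int) = x) ∧ validA sets (ls ++ ext) un = true) := by
  intro fuel
  induction fuel with
  | zero =>
    intro ls hnd hmem hfuel
    exact absurd (length_le_of_nodup_range ls sets.length hnd hmem) (by omega)
  | succ fuel ih =>
    intro ls hnd hmem hfuel
    by_cases hx : x = (ls.length : Int)
    · -- complete
      have : searchA (fuel + 1) sets ls un x = validA sets ls un := by
        simp [searchA, PySem.List.len, hx]
      rw [this]
      constructor
      · intro h
        exact ⟨[], by simp, by simp, by simpa using hx.symm, by simpa using h⟩
      · rintro ⟨ext, hend, hemem, hlen, hval⟩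
        have : ext = [] := by
          have : ext.length = 0 := by omega
          simpa [List.length_eq_zero_iff] using this
        subst this
        simpa using hval
    · -- incomplete: loop over extensions
      have : searchA (fuel + 1) sets ls un x =
          (extensionsA sets ls).any (fun k => searchA fuel sets (ls ++ [k]) un x) := by
        simp [searchA, PySem.List.len, hx]
      rw [this, List.any_eq_true]
      constructor
      · rintro ⟨k, hk, hs⟩
        rw [mem_extensionsA] at hk
        obtain ⟨hkr, hkls⟩ := hk
        have hnd' : (ls ++ [k]).Nodup :=
          (List.perm_append_singleton k ls).nodup_iff.2 (List.nodup_cons.2 ⟨hkls, hnd⟩)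
        have hmem' : ∀ i ∈ ls ++ [k], 0 ≤ i ∧ i < (sets.length : Int) := by
          intro i hi
          rcases List.mem_append.1 hi with h | h
          · exact hmem i h
          · simp at h; subst h; exact hkr
        obtain ⟨ext', hend', hemem', hlen', hval'⟩ :=
          (ih (ls ++ [k]) hnd' hmem' (by simp; omega)).1 hs
        refine ⟨k :: ext', ?_, ?_, ?_, ?_⟩
        · refine List.nodup_cons.2 ⟨?_, hend'⟩
          intro hkext
          exact (hemem' k hkext).2 (by simp)
        · intro i hi
          rcases List.mem_cons.1 hi with h | h
          · subst h; exact ⟨hkr, hkls⟩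
          · exact ⟨(hemem' i h).1, fun hils => (hemem' i h).2 (by simp [hils])⟩
        · simp at hlen' ⊢; omega
        · simpa [List.append_assoc] using hval'
      · rintro ⟨ext, hend, hemem, hlen, hval⟩
        match ext with
        | [] => simp at hlen; omega
        | k :: ext' =>
          have hkr := (hemem k (by simp)).1
          have hkls := (hemem k (by simp)).2
          refine ⟨k, (mem_extensionsA sets ls k).2 ⟨hkr, hkls⟩, ?_⟩
          have hnd' : (ls ++ [k]).Nodup :=
            (List.perm_append_singleton k ls).nodup_iff.2 (List.nodup_cons.2 ⟨hkls, hnd⟩)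
          have hmem' : ∀ i ∈ ls ++ [k], 0 ≤ i ∧ i < (sets.length : Int) := by
            intro i hi
            rcases List.mem_append.1 hi with h | h
            · exact hmem i h
            · simp at h; subst h; exact hkr
          refine (ih (ls ++ [k]) hnd' hmem' (by simp; omega)).2 ⟨ext', ?_, ?_, ?_, ?_⟩
          · exact (List.nodup_cons.1 hend).2
          · intro i hi
            refine ⟨(hemem i (by simp [hi])).1, ?_⟩
            intro h
            rcases List.mem_append.1 h with h' | h'
            · exact (hemem i (by simp [hi])).2 h'
            · simp at h'; subst h'
              exact (List.nodup_cons.1 hend).1 hi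
          · simp at hlen ⊢; omega
          · simpa [List.append_assoc] using hval

theorem mem_combosB (xs : List Int) :
    ∀ (k : Int) (c : List Int), 0 ≤ k →
      (c ∈ combosB xs k ↔ c.Sublist xs ∧ (c.length : Int) = k) := by
  induction xs with
  | nil =>
    intro k c hk
    unfold combosB
    by_cases h : k = 0
    · subst h
      constructor
      · intro hc; simp at hc; subst hc; simp
      · rintro ⟨hs, _⟩
        rw [List.sublist_nil] at hs; subst hs; simp
    · constructor
      · intro hc; simp [h] at hc
      · rintro ⟨hs, hl⟩
        rw [List.sublist_nil] at hs; subst hs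
        simp at hl; omega
  | cons x rest ih =>
    intro k c hk
    unfold combosB
    by_cases h : k = 0
    · subst h
      constructor
      · intro hc; simp at hc; subst hc
        exact ⟨List.nil_sublist _, by simp⟩
      · rintro ⟨_, hl⟩
        have hc : c = [] := by
          rw [List.length_eq_zero_iff.symm] at *
          omega
        subst hc; simp
    · have hk1 : 0 ≤ k - 1 := by omega
      simp only [h, if_false, List.mem_append, List.mem_map]
      constructor
      · rintro (⟨c', hc', rfl⟩ | hc)
        · obtain ⟨hsub, hlen⟩ := (ih (k - 1) c' hk1).1 hc'
          refine ⟨List.cons_sublist_cons.2 hsub, ?_⟩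
          simp only [List.length_cons]
          push_cast
          omega
        · obtain ⟨hsub, hlen⟩ := (ih k c hk).1 hc
          exact ⟨hsub.trans (List.sublist_cons_self x rest), hlen⟩
      · rintro ⟨hsub, hlen⟩
        rcases List.sublist_cons_iff.1 hsub with h' | ⟨r, rfl, hr⟩
        · exact Or.inr ((ih k c hk).2 ⟨h', hlen⟩)
        · refine Or.inl ⟨r, (ih (k - 1) r hk1).2 ⟨hr, ?_⟩, rfl⟩
          simp only [List.length_cons] at hlen
          push_cast at hlen ⊢
          omega

theorem exists_ext_iff_combo (sets : List (List Int)) (un : PySem.Set Int) (x : Int)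
    (hx : 0 ≤ x) :
    (∃ ext : List Int, ext.Nodup ∧ (∀ i ∈ ext, (0 ≤ i ∧ i < (sets.length : Int)) ∧ i ∉ ([] : List Int)) ∧
        ((([] : List Int).length : Int) + (ext.length : Int) = x) ∧ validA sets ([] ++ ext) un = true) ↔
      ∃ c ∈ combosB (PySem.List.pyRange 0 (sets.length : Int) 1) x,
        PySem.Set.equal (unionC sets c) un = true := by
  constructor
  · rintro ⟨ext, hnd, hmem, hlen, hval⟩
    set R := PySem.List.pyRange 0 (sets.length : Int) 1 with hR
    set c := R.filter (fun i => decide (i ∈ ext)) with hc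
    have hmemc : ∀ y, y ∈ c ↔ y ∈ ext := by
      intro y
      simp [hc, List.mem_filter, hR, PySem.List.mem_pyRange_one]
      intro hy
      exact ⟨(hmem y hy).1.1, (hmem y hy).1.2⟩
    have hcnd : c.Nodup := (PySem.List.nodup_pyRange_one 0 (sets.length : Int)).filter _
    have hperm : c.Perm ext := (List.perm_ext_iff_of_nodup hcnd hnd).2 hmemc
    refine ⟨c, (mem_combosB R x c hx).2 ⟨List.filter_sublist, by rw [hperm.length_eq]; simpa using hlen⟩, ?_⟩
    rw [checkB_iff]
    have := (validA_iff sets ([] ++ ext) un).1 hval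
    intro y
    rw [this y]
    simp only [List.nil_append]
    constructor
    · rintro ⟨i, hi, hyi⟩; exact ⟨i, (hmemc i).2 hi, hyi⟩
    · rintro ⟨i, hi, hyi⟩; exact ⟨i, (hmemc i).1 hi, hyi⟩
  · rintro ⟨c, hcmem, hceq⟩
    obtain ⟨hsub, hlen⟩ := (mem_combosB _ x c hx).1 hcmem
    refine ⟨c, hsub.nodup (PySem.List.nodup_pyRange_one _ _), ?_, by simpa using hlen, ?_⟩
    · intro i hi
      have := hsub.subset hi
      rw [PySem.List.mem_pyRange_one] at this
      exact ⟨⟨this.1, this.2⟩, by simp⟩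
    · rw [List.nil_append, validA_iff]
      exact (checkB_iff sets c un).1 hceq

theorem find?_congr_mem {α : Type} (p q : α → Bool) :
    ∀ (l : List α), (∀ a ∈ l, p a = q a) → l.find? p = l.find? q := by
  intro l
  induction l with
  | nil => intro _; rfl
  | cons a l ih =>
    intro h
    rw [List.find?_cons, List.find?_cons, h a (by simp)]
    cases q a
    · exact ih (fun b hb => h b (by simp [hb]))
    · rfl

theorem QN_true (sets : List (List Int)) :
    ((combosB (PySem.List.pyRange 0 (sets.length : Int) 1) (sets.length : Int)).any
      (fun c => PySem.Set.equal (unionC sets c)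
        (sets.foldl (fun un s => PySem.Set.union un s) PySem.Set.empty))) = true := by
  rw [List.any_eq_true]
  set R := PySem.List.pyRange 0 (sets.length : Int) 1 with hR
  refine ⟨R, (mem_combosB R _ R (Int.natCast_nonneg _)).2
      ⟨List.Sublist.refl _, by simp [hR, PySem.List.length_pyRange_one]⟩, ?_⟩
  rw [checkB_iff]
  intro y
  rw [show (sets.foldl (fun un s => PySem.Set.union un s) PySem.Set.empty)
      = sets.foldl (fun u a => PySem.Set.union u (id a)) PySem.Set.empty from rfl,
    mem_foldl_union]
  simp only [PySem.Set.empty, List.not_mem_nil, false_or, id]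
  constructor
  · rintro ⟨s, hs, hys⟩
    obtain ⟨n, hn, rfl⟩ := List.mem_iff_getElem.1 hs
    refine ⟨(n : Int), ?_, ?_⟩
    · simp [hR, PySem.List.mem_pyRange_one]; omega
    · rw [PySem.List.pyGetD_natCast, List.getD_eq_getElem _ _ (by simpa using hn)]
      exact hys
  · rintro ⟨i, hi, hyi⟩
    rw [hR, PySem.List.mem_pyRange_one] at hi
    have h0 : i = ((i.toNat : Nat) : Int) := by omega
    rw [h0, PySem.List.pyGetD_natCast,
      List.getD_eq_getElem _ _ (show i.toNat < sets.length by omega)] at hyi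
    exact ⟨sets[i.toNat], List.getElem_mem _, hyi⟩

theorem uniao_spec' : ∀ (sets : List (List Int)), uniao sets = uniao_alt sets := by
  intro sets
  unfold uniao uniao_alt
  simp only [PySem.List.len]
  set N : Int := (sets.length : Int) with hN
  set un := sets.foldl (fun u s => PySem.Set.union u s) PySem.Set.empty with hun
  have hpq : ∀ x ∈ PySem.List.pyRange 0 N 1,
      searchA (sets.length + 1) sets [] un x =
      ((combosB (PySem.List.pyRange 0 N 1) x).any
        (fun c => PySem.Set.equal (unionC sets c) un)) := by
    intro x hxmem
    rw [PySem.List.mem_pyRange_one] at hxmem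
    have h1 := searchA_iff sets un x (sets.length + 1) [] (by simp) (by simp) (by omega)
    have h2 := exists_ext_iff_combo sets un x hxmem.1
    rw [Bool.eq_iff_iff, h1, List.any_eq_true]
    exact h2
  rw [find?_congr_mem _ _ _ hpq]
  rw [show N + 1 = N + 1 from rfl,
    PySem.List.pyRange_one_succ_right (by omega), List.find?_append]
  cases hfind : (PySem.List.pyRange 0 N 1).find?
      (fun k => (combosB (PySem.List.pyRange 0 N 1) k).any
        (fun c => PySem.Set.equal (unionC sets c) un)) with
  | some v => simp
  | none =>
    simp only [Option.or]
    rw [List.find?_cons]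
    rw [show ((combosB (PySem.List.pyRange 0 N 1) N).any
        (fun c => PySem.Set.equal (unionC sets c) un)) = true from QN_true sets]

-- ===== VERDICT (by name: the statement is the Claim_ definition above) =====
theorem uniao_spec : Claim_equal_uniao := by
  intro sets _
  unfold Spec_uniao
  exact uniao_spec' sets
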